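-- pv_equiv track=rewrite | github.com/nbarker2021/Aletheia2 | integration/slices/code/cqe_hasse_slice.py | _verify_adjoint_property
-- ===== SOURCE A (Python) =====
-- from typing import Dict, List, Tuple, Set, Any, Optional
--
-- def _verify_adjoint_property(f: str, g: str, elements: List[str],
--                             relations: Dict[Tuple[str, str], bool]) -> bool:
--     """Verify F ⊣ G adjoint property"""
--
--     # Simplified check: for some elements x, y verify F(x) ≤ y ⟺ x ≤ G(y)
--     # This is a heuristic since we don't have actual function mappings
--
--     for x in elements[:3]:  # Check subset for efficiency
--         for y in elements[:3]:
--             # Assume F maps x to some related element, G maps y similarly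
--             fx_leq_y = relations.get((f, y), False)
--             x_leq_gy = relations.get((x, g), False)
--
--             # For adjoint property, these should be equivalent
--             if fx_leq_y != x_leq_gy:
--                 return False
--
--     return True
-- ===== SOURCE B (Python) =====
-- from typing import Dict, List, Tuple
--
-- def _verify_adjoint_property(f: str, g: str, elements: List[str],
--                              relations: Dict[Tuple[str, str], bool]) -> bool:
--     """Verify F ⊣ G adjoint property: every relevant lookup must equal a
--     single reference value (the first f-row lookup)."""
--     if not elements:
--         return True
--     ref = relations.get((f, elements[0]), False)
--     checked = 0
--     for e in elements:
--         if checked >= 3: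
--             break
--         if relations.get((f, e), False) != ref:
--             return False
--         if relations.get((e, g), False) != ref:
--             return False
--         checked += 1
--     return True
-- ===== Notes on version B (the rewrite author's own statement) =====
-- stated objective: simpler
-- what changed: Replaces A's early-exit nested double loop over all pairs of the first three elements by a single bounded pass that takes the first f-row lookup as a reference value and checks every f-row and g-column lookup against it, using that all pairwise agreements hold iff every lookup equals one common value.
import Mathlib
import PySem

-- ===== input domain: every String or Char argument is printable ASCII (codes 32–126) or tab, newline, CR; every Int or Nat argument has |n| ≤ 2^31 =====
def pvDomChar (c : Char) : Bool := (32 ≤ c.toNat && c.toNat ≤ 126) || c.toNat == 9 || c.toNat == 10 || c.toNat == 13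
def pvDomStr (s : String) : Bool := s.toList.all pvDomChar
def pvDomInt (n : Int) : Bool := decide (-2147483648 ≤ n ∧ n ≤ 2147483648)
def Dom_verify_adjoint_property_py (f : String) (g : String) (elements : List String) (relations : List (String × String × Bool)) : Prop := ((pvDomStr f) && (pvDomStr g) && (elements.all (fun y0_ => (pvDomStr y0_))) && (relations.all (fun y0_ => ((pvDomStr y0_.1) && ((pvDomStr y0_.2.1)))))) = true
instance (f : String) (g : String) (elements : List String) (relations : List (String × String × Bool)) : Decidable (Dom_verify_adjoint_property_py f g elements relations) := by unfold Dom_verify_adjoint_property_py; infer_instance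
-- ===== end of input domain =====

-- B replaces A's nested double loop over all pairs by a single fuel-bounded pass that
-- compares every relevant lookup against one reference value (objective: simpler).

-- ===== PORT A =====
-- relations.get((a, b), False): first-match lookup in the association list (Python dict
-- keys are unique, so first match = the stored value), default False — exact
def pvDget (relations : List (String × String × Bool)) (a b : String) : Bool :=
  match relations with
  | [] => false
  | (k1, k2, v) :: rest => if k1 == a && k2 == b then v else pvDget rest a b

-- elements[:3] with a nonnegative literal bound = List.take 3 — exact
def verify_adjoint_property_py (f : String) (g : String) (elements : List String) (relations : List (String × String × Bool)) : Bool :=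
  -- the early-exit double loop: return False on the first mismatch ↔ short-circuit `all`
  (elements.take 3).all (fun x =>
    (elements.take 3).all (fun y =>
      pvDget relations f y == pvDget relations x g))

-- ===== PORT B =====
-- Source B's relations.get((a, b), False), written as a first-match find? over the pairs
def pvLookup (relations : List (String × String × Bool)) (a b : String) : Bool :=
  ((relations.find? (fun kv => kv.1 == a && kv.2.1 == b)).map (fun kv => kv.2.2)).getD false

-- Source B's single loop: `checked` counts down as fuel; stop at 3 or at the list's end
def pvRefLoop (f : String) (g : String) (relations : List (String × String × Bool))
    (ref : Bool) : List String → Nat → Bool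
  | _, 0 => true
  | [], _ => true
  | e :: rest, Nat.succ n =>
    if pvLookup relations f e ≠ ref then false
    else if pvLookup relations e g ≠ ref then false
    else pvRefLoop f g relations ref rest n

def verify_adjoint_property_py_alt (f : String) (g : String) (elements : List String) (relations : List (String × String × Bool)) : Bool :=
  match elements with
  | [] => true
  | e0 :: _ => pvRefLoop f g relations (pvLookup relations f e0) elements 3

-- ===== PRECONDITION & SPEC =====
def Spec_verify_adjoint_property_py (f : String) (g : String) (elements : List String) (relations : List (String × String × Bool)) (out : Bool) : Prop := out = verify_adjoint_property_py_alt f g elements relations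
instance (f : String) (g : String) (elements : List String) (relations : List (String × String × Bool)) (out : Bool) : Decidable (Spec_verify_adjoint_property_py f g elements relations out) := by unfold Spec_verify_adjoint_property_py; infer_instance

-- ===== CLAIM (what is proved, stated in full; the proofs are below) =====
def Claim_equal_verify_adjoint_property_py : Prop := ∀ (f : String) (g : String) (elements : List String) (relations : List (String × String × Bool)), Dom_verify_adjoint_property_py f g elements relations → Spec_verify_adjoint_property_py f g elements relations (verify_adjoint_property_py f g elements relations)

-- ===== LEMMAS AND PROOFS =====

-- the two ports' lookup helpers compute the same first-match dict lookup
theorem pvLookup_eq_pvDget (relations : List (String × String × Bool)) (a b : String) :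
    pvLookup relations a b = pvDget relations a b := by
  induction relations with
  | nil => rfl
  | cons kv rest ih =>
    obtain ⟨k1, k2, v⟩ := kv
    simp only [pvLookup, pvDget, List.find?]
    by_cases h : (k1 == a && k2 == b) = true
    · simp [h]
    · simp only [h]
      simp only [Bool.false_eq_true, if_false]
      exact ih

-- Finite boolean identities: "all ≤ 9 pairwise agreements" equals "every lookup value
-- equals the first f-row value", for 1, 2 and 3 retained elements; checked by `decide`.
theorem pvRef1 : ∀ (p q : Bool),
    (p == q && true && true) =
      (if p ≠ p then false else if q ≠ p then false else true) := by decide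

theorem pvRef2 : ∀ (p1 p2 q1 q2 : Bool),
    (p1 == q1 && (p2 == q1 && true) && (p1 == q2 && (p2 == q2 && true) && true)) =
      (if p1 ≠ p1 then false else if q1 ≠ p1 then false else
        if p2 ≠ p1 then false else if q2 ≠ p1 then false else true) := by decide

theorem pvRef3 : ∀ (p1 p2 p3 q1 q2 q3 : Bool),
    (p1 == q1 && (p2 == q1 && (p3 == q1 && true)) &&
      (p1 == q2 && (p2 == q2 && (p3 == q2 && true)) &&
        (p1 == q3 && (p2 == q3 && (p3 == q3 && true)) && true))) =
      (if p1 ≠ p1 then false else if q1 ≠ p1 then false else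
        if p2 ≠ p1 then false else if q2 ≠ p1 then false else
          if p3 ≠ p1 then false else if q3 ≠ p1 then false else true) := by decide

-- Both sides depend on the input only through the ≤ 6 booleans pvDget relations f yᵢ and
-- pvDget relations xᵢ g: case on the shape of `elements` (up to 3 kept), rewrite pvLookup
-- to pvDget and apply the matching finite boolean identity.
theorem verify_adjoint_property_py_eq_alt (f g : String) (elements : List String) (relations : List (String × String × Bool)) :
    verify_adjoint_property_py f g elements relations = verify_adjoint_property_py_alt f g elements relations := by
  unfold verify_adjoint_property_py verify_adjoint_property_py_alt
  rcases elements with _ | ⟨a, _ | ⟨b, _ | ⟨c, rest⟩⟩⟩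
  · rfl
  · simp only [List.take, List.all, pvRefLoop, pvLookup_eq_pvDget]
    exact pvRef1 (pvDget relations f a) (pvDget relations a g)
  · simp only [List.take, List.all, pvRefLoop, pvLookup_eq_pvDget]
    exact pvRef2 (pvDget relations f a) (pvDget relations f b)
      (pvDget relations a g) (pvDget relations b g)
  · simp only [List.take, List.all, pvRefLoop, pvLookup_eq_pvDget]
    exact pvRef3 (pvDget relations f a) (pvDget relations f b) (pvDget relations f c)
      (pvDget relations a g) (pvDget relations b g) (pvDget relations c g)

-- ===== VERDICT (by name: the statement is the Claim_ definition above) =====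
theorem verify_adjoint_property_py_spec : Claim_equal_verify_adjoint_property_py := by
  intro f g elements relations _
  exact verify_adjoint_property_py_eq_alt f g elements relations
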